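-- pv_equiv track=rewrite | github.com/S-SIRIUS/Programmers | 프로그래머스/2/340212. ［PCCP 기출문제］ 2번 ／ 퍼즐 게임 챌린지/［PCCP 기출문제］ 2번 ／ 퍼즐 게임 챌린지.py | solution
-- ===== SOURCE A (Python) =====
-- def cal(level, diffs, times):
--     result=0
--     for i in range(len(diffs)):
--         result+=times[i]
--         if diffs[i] > level:
--             if i>=1:
--                 time_prev = times[i-1]
--             else:
--                 time_prev = 0
--             result+=(diffs[i]-level)*(time_prev +times[i])
--     return result
--
-- def solution(diffs, times, limit):
--     answer = 0
--     start = 1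
--     end = 100000
--     while start <= end:
--         middle = (start+end)//2
--         value = cal(middle, diffs, times)
--         if value > limit:
--             start = middle+1
--         else:
--             end = middle-1
--             answer = middle
--
--     return answer
-- ===== SOURCE B (Python) =====
-- def solution(diffs, times, limit):
--     # Precompute per-puzzle fail coefficients once, sort them by difficulty
--     # descending, and evaluate each probed level's cost by an early-exit scan
--     # over only the puzzles whose difficulty exceeds the level.
--     base = 0
--     pairs = []
--     prev = 0
--     for d, t in zip(diffs, times):
--         base += t
--         pairs.append((d, t + prev))
--         prev = t
--     pairs.sort(key=lambda p: p[0], reverse=True)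
--
--     def cost(level):
--         s = base
--         for d, c in pairs:
--             if d <= level:
--                 break
--             s += (d - level) * c
--         return s
--
--     answer = 0
--     lo, hi = 1, 100000
--     while lo <= hi:
--         mid = (lo + hi) // 2
--         if cost(mid) > limit:
--             lo = mid + 1
--         else:
--             hi = mid - 1
--             answer = mid
--     return answer
-- ===== Notes on version B (the rewrite author's own statement) =====
-- stated objective: alternative
-- what changed: Instead of re-walking the whole original arrays with index arithmetic and a time_prev branch at every probed level, B precomputes each puzzle's fail coefficient (times[i]+times[i-1]) and the base time sum once, sorts the (diff, coeff) pairs by difficulty descending, and evaluates each probed level's cost by an early-exit scan over only the pairs whose difficulty exceeds that level; the outer bisection over levels is kept because the cost need not be monotone for arbitrary integer times, so the exact probe trace must be preserved.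
import Mathlib
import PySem

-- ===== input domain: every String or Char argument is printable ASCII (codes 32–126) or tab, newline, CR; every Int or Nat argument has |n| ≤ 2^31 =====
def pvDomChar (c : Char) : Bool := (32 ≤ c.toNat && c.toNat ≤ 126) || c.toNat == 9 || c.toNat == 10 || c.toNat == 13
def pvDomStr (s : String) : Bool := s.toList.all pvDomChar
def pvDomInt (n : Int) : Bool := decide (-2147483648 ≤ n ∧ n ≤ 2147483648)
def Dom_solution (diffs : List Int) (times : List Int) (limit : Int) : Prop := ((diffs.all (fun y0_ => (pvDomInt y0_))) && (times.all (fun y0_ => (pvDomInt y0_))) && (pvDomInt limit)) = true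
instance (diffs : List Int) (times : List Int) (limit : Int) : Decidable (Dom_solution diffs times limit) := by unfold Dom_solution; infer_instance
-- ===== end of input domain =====

-- B precomputes each puzzle's fail coefficient once, sorts the (diff, coeff)
-- pairs by difficulty descending and evaluates each probed level's cost by an
-- early-exit scan over only the puzzles harder than that level (objective:
-- alternative). Return-value equivalence only; neither version mutates its
-- arguments observably (B sorts a private list).

-- ===== PORT A =====
-- for i in range(len(diffs)): result += times[i]; if diffs[i] > level: …
def cal (level : Int) (diffs : List Int) (times : List Int) : Int :=
  (PySem.List.pyRange 0 (diffs.length : Int) 1).foldl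
    (fun result i =>
      let result := result + PySem.List.pyGetD times i 0
      if PySem.List.pyGetD diffs i 0 > level then
        let time_prev := if i ≥ 1 then PySem.List.pyGetD times (i - 1) 0 else 0
        result + (PySem.List.pyGetD diffs i 0 - level) * (time_prev + PySem.List.pyGetD times i 0)
      else result)
    0

-- while start <= end: middle = (start+end)//2; …
def solutionLoop (diffs : List Int) (times : List Int) (limit : Int)
    (start endv answer : Int) : Int :=
  if h : start ≤ endv then
    let middle := PySem.Int.floordiv (start + endv) 2
    let value := cal middle diffs times
    if value > limit then
      solutionLoop diffs times limit (middle + 1) endv answer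
    else
      solutionLoop diffs times limit start (middle - 1) middle
  else answer
termination_by (endv + 1 - start).toNat
decreasing_by
  · have hb := PySem.Int.floordiv_two_mid_bounds h
    omega
  · have hb := PySem.Int.floordiv_two_mid_bounds h
    omega

def solution (diffs : List Int) (times : List Int) (limit : Int) : Int :=
  solutionLoop diffs times limit 1 100000 0

-- ===== PORT B =====
-- for d, t in pairs: if d <= level: break; s += (d - level) * c
def costScan (level : Int) (pairs : List (Int × Int)) (s : Int) : Int :=
  match pairs with
  | [] => s
  | (d, c) :: rest => if d ≤ level then s else costScan level rest (s + (d - level) * c)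

def altLoop (base : Int) (pairs : List (Int × Int)) (limit : Int)
    (lo hi answer : Int) : Int :=
  if h : lo ≤ hi then
    let mid := PySem.Int.floordiv (lo + hi) 2
    if costScan mid pairs base > limit then
      altLoop base pairs limit (mid + 1) hi answer
    else
      altLoop base pairs limit lo (mid - 1) mid
  else answer
termination_by (hi + 1 - lo).toNat
decreasing_by
  · have hb := PySem.Int.floordiv_two_mid_bounds h
    omega
  · have hb := PySem.Int.floordiv_two_mid_bounds h
    omega

def solution_alt (diffs : List Int) (times : List Int) (limit : Int) : Int :=
  let st := (List.zip diffs times).foldl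
    (fun (st : Int × List (Int × Int) × Int) dt =>
      (st.1 + dt.2, st.2.1 ++ [(dt.1, dt.2 + st.2.2)], dt.2))
    (0, [], 0)
  let base := st.1
  let pairs := PySem.List.sorted st.2.1 (fun p => p.1) true
  altLoop base pairs limit 1 100000 0

-- ===== PRECONDITION & SPEC =====
-- A raises IndexError (times[i] for i = len(times)) when diffs is longer than times.
def Pre_solution (diffs : List Int) (times : List Int) (limit : Int) : Prop :=
  diffs.length ≤ times.length
instance (diffs : List Int) (times : List Int) (limit : Int) : Decidable (Pre_solution diffs times limit) := by unfold Pre_solution; infer_instance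

def pvWitness_solution : List Int × List Int × Int := ([3, 2], [5, 4], 30)

def Spec_solution (diffs : List Int) (times : List Int) (limit : Int) (out : Int) : Prop := out = solution_alt diffs times limit
instance (diffs : List Int) (times : List Int) (limit : Int) (out : Int) : Decidable (Spec_solution diffs times limit out) := by unfold Spec_solution; infer_instance

-- ===== CLAIM (what is proved, stated in full; the proofs are below) =====
def Claim_equal_solution : Prop := ∀ (diffs : List Int) (times : List Int) (limit : Int), Dom_solution diffs times limit → Pre_solution diffs times limit → Spec_solution diffs times limit (solution diffs times limit)


-- ===== LEMMAS AND PROOFS =====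

-- contribution a pair adds to the variable part of the cost at a given level
def pvContrib (level : Int) (p : Int × Int) : Int :=
  if p.1 > level then (p.1 - level) * p.2 else 0

-- pair list B's building loop produces, as a structural recursion
def pvPairsOf : List (Int × Int) → Int → List (Int × Int)
  | [], _ => []
  | (d, t) :: r, pv => (d, t + pv) :: pvPairsOf r t

-- the `prev` variable after B's building loop
def pvPrevOf : List (Int × Int) → Int → Int
  | [], pv => pv
  | (_, t) :: r, _ => pvPrevOf r t

lemma pvBuild_proj (l : List (Int × Int)) (b : Int) (ps : List (Int × Int)) (pv : Int) :
    l.foldl (fun (st : Int × List (Int × Int) × Int) dt =>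
        (st.1 + dt.2, st.2.1 ++ [(dt.1, dt.2 + st.2.2)], dt.2)) (b, ps, pv)
      = (b + (l.map Prod.snd).sum, ps ++ pvPairsOf l pv, pvPrevOf l pv) := by
  induction l generalizing b ps pv with
  | nil => simp [pvPairsOf]; rfl
  | cons x r ih =>
    obtain ⟨d, t⟩ := x
    simp [List.foldl_cons, ih, pvPairsOf, pvPrevOf]
    ring

lemma pvPairsOf_append (l : List (Int × Int)) (d t pv : Int) :
    pvPairsOf (l ++ [(d, t)]) pv = pvPairsOf l pv ++ [(d, t + pvPrevOf l pv)] := by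
  induction l generalizing pv with
  | nil => simp [pvPairsOf, pvPrevOf]
  | cons x r ih => obtain ⟨d', t'⟩ := x; simp [pvPairsOf, pvPrevOf, ih]

lemma pvZip_append_singleton (ds : List Int) (d : Int) (times : List Int)
    (h : ds.length < times.length) :
    List.zip (ds ++ [d]) times = List.zip ds times ++ [(d, times.getD ds.length 0)] := by
  induction ds generalizing times with
  | nil =>
    cases times with
    | nil => simp at h
    | cons t ts => simp [List.zip]
  | cons a as ih =>
    cases times with
    | nil => simp at h
    | cons t ts =>
      simp only [List.cons_append, List.zip_cons_cons, List.cons_append]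
      rw [ih ts (by simpa using h)]
      simp

lemma pvPrevOf_zip (ds : List Int) (times : List Int) (pv : Int)
    (h : ds.length ≤ times.length) :
    pvPrevOf (List.zip ds times) pv
      = if ds.length = 0 then pv else times.getD (ds.length - 1) 0 := by
  induction ds generalizing times pv with
  | nil => simp [pvPrevOf]
  | cons a as ih =>
    cases times with
    | nil => simp at h
    | cons t ts =>
      simp only [List.zip_cons_cons, pvPrevOf]
      rw [ih ts t (by simpa using h)]
      cases as with
      | nil => simp [pvPrevOf]
      | cons b bs => simp

lemma pvPyGetD_append_left (l l' : List Int) (i : Int) (h0 : 0 ≤ i) (h1 : i < l.length) :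
    PySem.List.pyGetD (l ++ l') i 0 = PySem.List.pyGetD l i 0 := by
  rw [PySem.List.pyGetD_of_nonneg (l ++ l') 0 h0, PySem.List.pyGetD_of_nonneg l 0 h0]
  rw [List.getD_append l l' 0 i.toNat (by omega)]

lemma pvGetD_append_last (l : List Int) (d : Int) :
    (l ++ [d]).getD l.length 0 = d := by
  rw [List.getD_eq_getElem _ _ (by simp)]
  simp

-- A's cal equals the base sum plus the summed contributions of B's pair list.
lemma pvCal_eq (level : Int) (times : List Int) :
    ∀ diffs : List Int, diffs.length ≤ times.length →
      cal level diffs times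
        = ((List.zip diffs times).map Prod.snd).sum
            + ((pvPairsOf (List.zip diffs times) 0).map (pvContrib level)).sum := by
  intro diffs
  induction diffs using List.reverseRecOn with
  | nil => intro _; simp [cal, pvPairsOf, PySem.List.pyRange_one_eq_nil]
  | append_singleton ds d ih =>
    intro h
    have hn : ds.length < times.length := by simp at h; omega
    have hz := pvZip_append_singleton ds d times hn
    -- split the index range of cal at the last index
    have hcast : ((ds ++ [d]).length : Int) = (ds.length : Int) + 1 := by simp
    unfold cal
    rw [hcast, PySem.List.pyRange_one_succ_right (by positivity), List.foldl_append]
    -- the fold over the first ds.length indices only reads the ds part of diffs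
    have hcongr :
        (PySem.List.pyRange 0 (ds.length : Int) 1).foldl
          (fun result i =>
            let result := result + PySem.List.pyGetD times i 0
            if PySem.List.pyGetD (ds ++ [d]) i 0 > level then
              let time_prev := if i ≥ 1 then PySem.List.pyGetD times (i - 1) 0 else 0
              result + (PySem.List.pyGetD (ds ++ [d]) i 0 - level)
                  * (time_prev + PySem.List.pyGetD times i 0)
            else result) 0
        = cal level ds times := by
      unfold cal
      apply PySem.List.foldl_congr_mem
      intro acc i hi
      have hi' := (PySem.List.mem_pyRange_one).1 hi
      rw [pvPyGetD_append_left ds [d] i hi'.1 (by exact_mod_cast hi'.2)]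
    rw [hcongr, ih (by omega)]
    -- evaluate the last loop iteration
    have hdlast : PySem.List.pyGetD (ds ++ [d]) ((ds.length : Nat) : Int) 0 = d := by
      rw [PySem.List.pyGetD_natCast, pvGetD_append_last]
    have hprev : (if ((ds.length : Nat) : Int) ≥ 1 then
          PySem.List.pyGetD times (((ds.length : Nat) : Int) - 1) 0 else 0)
        = pvPrevOf (List.zip ds times) 0 := by
      rw [pvPrevOf_zip ds times 0 (by omega)]
      by_cases h0 : ds.length = 0
      · simp [h0]
      · have h1 : ((ds.length : Nat) : Int) ≥ 1 := by omega
        have h2 : ((ds.length : Nat) : Int) - 1 = ((ds.length - 1 : Nat) : Int) := by omega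
        simp only [h1, if_pos, h2, PySem.List.pyGetD_natCast]
        simp [h0]
    rw [hz, pvPairsOf_append]
    simp only [List.foldl_cons, List.foldl_nil]
    simp only [List.map_append, List.sum_append, List.map_cons, List.map_nil,
      List.sum_cons, List.sum_nil, hdlast, PySem.List.pyGetD_natCast, ← hprev, pvContrib]
    split_ifs <;> ring
  -- (the induction tactic needs the statement ∀-quantified over diffs)

lemma pvSum_contrib_zero (level : Int) (l : List (Int × Int))
    (h : ∀ p ∈ l, p.1 ≤ level) :
    (l.map (pvContrib level)).sum = 0 := by
  induction l with
  | nil => simp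
  | cons p r ih =>
    simp only [List.map_cons, List.sum_cons]
    rw [ih (fun q hq => h q (List.mem_cons_of_mem _ hq))]
    have hple := h p (List.mem_cons_self)
    simp [pvContrib, show ¬ p.1 > level by omega]

-- on a list sorted by difficulty descending, the early-exit scan sums all contributions
lemma pvCostScan_eq (level : Int) :
    ∀ (pairs : List (Int × Int)) (s : Int),
      pairs.Pairwise (fun a b => b.1 ≤ a.1) →
      costScan level pairs s = s + (pairs.map (pvContrib level)).sum := by
  intro pairs
  induction pairs with
  | nil => intro s _; simp [costScan]
  | cons p r ih =>
    intro s hp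
    obtain ⟨d, c⟩ := p
    rw [List.pairwise_cons] at hp
    by_cases hd : d ≤ level
    · have hall : ∀ q ∈ (d, c) :: r, q.1 ≤ level := by
        intro q hq
        rcases List.mem_cons.1 hq with h1 | h2
        · rw [h1]; exact hd
        · exact le_trans (hp.1 q h2) hd
      rw [pvSum_contrib_zero level _ hall]
      simp [costScan, hd]
    · simp only [costScan, if_neg hd]
      rw [ih _ hp.2]
      simp only [pvContrib, List.map_cons, List.sum_cons]
      rw [if_pos (show (d, c).1 > level by simp; omega)]
      ring

-- the two binary-search loops coincide once the evaluated costs coincide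
lemma pvLoop_eq (diffs times : List Int) (limit base : Int) (pairs : List (Int × Int))
    (hcost : ∀ m : Int, cal m diffs times = costScan m pairs base) :
    ∀ lo hi ans : Int,
      solutionLoop diffs times limit lo hi ans = altLoop base pairs limit lo hi ans := by
  intro lo hi ans
  induction lo, hi, ans using solutionLoop.induct diffs times limit with
  | case1 lo hi ans h middle value hv ih =>
    rw [solutionLoop, altLoop]
    simp only [dif_pos h, ← hcost]
    split_ifs with hs
    · exact ih
    · exact absurd hv hs
  | case2 lo hi ans h middle value hv ih =>
    rw [solutionLoop, altLoop]
    simp only [dif_pos h, ← hcost]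
    split_ifs with hs
    · exact absurd hs hv
    · exact ih
  | case3 lo hi ans h =>
    rw [solutionLoop, altLoop]
    simp only [dif_neg h]

-- ===== VERDICT (by name: the statement is the Claim_ definition above) =====
theorem solution_spec : Claim_equal_solution := by
  intro diffs times limit _ hpre
  unfold Spec_solution solution solution_alt
  rw [pvBuild_proj]
  simp only
  apply pvLoop_eq
  intro m
  have hperm := ((PySem.List.sorted_perm (pvPairsOf (List.zip diffs times) 0)
    Prod.fst true).map (pvContrib m)).sum_eq
  simp only [List.nil_append]
  rw [pvCal_eq m times diffs hpre,
    pvCostScan_eq m _ _ (PySem.List.sorted_pairwise_rev _ _), hperm]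
  ring
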